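-- pv_equiv track=rewrite | github.com/rfarias/polymarket-bot | market/markets_discovery_v2.py | _matches_btc
-- ===== SOURCE A (Python) =====
-- BTC_HINTS = [
--     "btc",
--     "bitcoin",
--     "up or down",
--     "updown",
--     "5m",
--     "15m",
--     "1h",
-- ]
--
-- def _matches_btc(market):
--     parts = [
--         market.get("question"),
--         market.get("slug"),
--         market.get("ticker"),
--         market.get("groupItemTitle"),
--         market.get("description"),
--     ]
--     blob = " ".join(str(p or "") for p in parts).lower()
--     return any(k in blob for k in BTC_HINTS) and ("btc" in blob or "bitcoin" in blob)
-- ===== SOURCE B (Python) =====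
-- BTC_KEYS = ("question", "slug", "ticker", "groupItemTitle", "description")
--
-- def _matches_btc(market):
--     for key in BTC_KEYS:
--         text = (market.get(key) or "").lower()
--         if "btc" in text or "bitcoin" in text:
--             return True
--     return False
-- ===== Notes on version B (the rewrite author's own statement) =====
-- stated objective: simpler
-- what changed: B drops the joined blob and the BTC_HINTS any()-loop (redundant, since 'btc' and 'bitcoin' are themselves hints) and instead scans the five fields one by one with an early return on the first field containing 'btc' or 'bitcoin'.
import Mathlib
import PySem

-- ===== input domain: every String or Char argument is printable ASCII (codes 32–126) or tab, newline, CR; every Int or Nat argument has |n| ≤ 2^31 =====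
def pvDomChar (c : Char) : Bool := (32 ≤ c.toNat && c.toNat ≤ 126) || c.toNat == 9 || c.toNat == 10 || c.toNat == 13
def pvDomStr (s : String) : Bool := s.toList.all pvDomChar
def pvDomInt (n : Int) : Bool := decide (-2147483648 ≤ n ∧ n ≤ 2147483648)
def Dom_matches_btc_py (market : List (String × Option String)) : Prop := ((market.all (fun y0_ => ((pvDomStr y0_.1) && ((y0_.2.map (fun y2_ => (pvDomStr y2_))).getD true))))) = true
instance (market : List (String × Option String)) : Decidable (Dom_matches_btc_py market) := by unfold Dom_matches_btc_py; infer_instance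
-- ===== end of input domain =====

-- B drops the joined blob and the redundant BTC_HINTS any()-loop and scans the five
-- fields one by one with an early return (objective: simpler).

-- ===== PORT A =====
def btcHints : List String := ["btc", "bitcoin", "up or down", "updown", "5m", "15m", "1h"]

def matches_btc_py (market : List (String × Option String)) : Bool :=
  let d := PySem.Dict.mk market
  let parts : List (Option String) :=
    [(d.get? "question").join, (d.get? "slug").join, (d.get? "ticker").join,
     (d.get? "groupItemTitle").join, (d.get? "description").join]
  let blob := PySem.Str.lower (PySem.Str.join " " (parts.map (fun p => p.getD "")))
  (btcHints.any (fun k => PySem.Str.isIn k blob)) &&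
    (PySem.Str.isIn "btc" blob || PySem.Str.isIn "bitcoin" blob)

-- ===== PORT B =====
def btcKeys : List String := ["question", "slug", "ticker", "groupItemTitle", "description"]

def matchesBtcLoop (market : List (String × Option String)) : List String → Bool
  | [] => false
  | key :: rest =>
    let text := PySem.Str.lower (((PySem.Dict.mk market).get? key).join.getD "")
    if PySem.Str.isIn "btc" text || PySem.Str.isIn "bitcoin" text then true
    else matchesBtcLoop market rest

def matches_btc_py_alt (market : List (String × Option String)) : Bool :=
  matchesBtcLoop market btcKeys

-- ===== PRECONDITION & SPEC =====
def Spec_matches_btc_py (market : List (String × Option String)) (out : Bool) : Prop := out = matches_btc_py_alt market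
instance (market : List (String × Option String)) (out : Bool) : Decidable (Spec_matches_btc_py market out) := by unfold Spec_matches_btc_py; infer_instance

-- ===== CLAIM (what is proved, stated in full; the proofs are below) =====
def Claim_equal_matches_btc_py : Prop := ∀ (market : List (String × Option String)), Dom_matches_btc_py market → Spec_matches_btc_py market (matches_btc_py market)

-- ===== LEMMAS AND PROOFS =====

-- 'sub <+: a ++ c :: b ↔ sub <+: a' when c does not occur in sub
lemma prefix_append_cons : ∀ (sub a b : List Char) (c : Char), c ∉ sub → (sub <+: a ++ c :: b ↔ sub <+: a)
  | [], a, b, c, _ => by simp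
  | d :: sub', [], b, c, hc => by
      simp only [List.nil_append, List.cons_prefix_cons, List.prefix_nil]
      constructor
      · rintro ⟨hd, -⟩
        exact absurd (hd ▸ List.mem_cons_self) hc
      · intro h
        exact absurd h (List.cons_ne_nil _ _)
  | d :: sub', x :: a', b, c, hc => by
      simp only [List.cons_append, List.cons_prefix_cons]
      have := prefix_append_cons sub' a' b c (fun h => hc (List.mem_cons_of_mem _ h))
      exact and_congr_right (fun _ => this)

-- an infix not containing c of 'a ++ c :: b' lies wholly inside a or wholly inside b
lemma infix_split (sub b : List Char) (c : Char) (hc : c ∉ sub) :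
    ∀ (a : List Char), (sub <:+: a ++ c :: b ↔ sub <:+: a ∨ sub <:+: b) := by
  intro a
  induction a with
  | nil =>
      rw [List.nil_append, List.infix_cons_iff,
        show (c :: b) = [] ++ c :: b from rfl, prefix_append_cons sub [] b c hc]
      simp only [List.prefix_nil, List.infix_nil]
  | cons x a' ih =>
      rw [List.cons_append, List.infix_cons_iff,
        show (x :: (a' ++ c :: b)) = (x :: a') ++ c :: b from rfl,
        prefix_append_cons sub (x :: a') b c hc, ih, List.infix_cons_iff]
      tauto

lemma lowerChar_space : PySem.Chars.lowerChar ' ' = ' ' := by decide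

lemma isIn_lower_blob (sub s1 s2 s3 s4 s5 : String) (hc : ' ' ∉ sub.toList) :
    PySem.Str.isIn sub (PySem.Str.lower (PySem.Str.join " " [s1, s2, s3, s4, s5]))
    = (PySem.Str.isIn sub (PySem.Str.lower s1) || PySem.Str.isIn sub (PySem.Str.lower s2) ||
       PySem.Str.isIn sub (PySem.Str.lower s3) || PySem.Str.isIn sub (PySem.Str.lower s4) ||
       PySem.Str.isIn sub (PySem.Str.lower s5)) := by
  have hsp : (" " : String).toList = [' '] := rfl
  rw [Bool.eq_iff_iff]
  simp only [PySem.Str.isIn_eq, PySem.Str.toList_lower, PySem.Str.toList_join,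
    PySem.Chars.join, List.map_cons, List.map_nil, List.intercalate, List.intersperse,
    List.flatten, PySem.Chars.lower, List.append_eq, hsp, List.map_append, lowerChar_space,
    List.cons_append, List.nil_append,
    List.append_nil, Bool.or_eq_true, PySem.Chars.isIn_iff_infix]
  rw [infix_split _ _ _ hc, infix_split _ _ _ hc, infix_split _ _ _ hc, infix_split _ _ _ hc]
  tauto

lemma hints_drop (blob : String) :
    ((btcHints.any (fun k => PySem.Str.isIn k blob)) &&
      (PySem.Str.isIn "btc" blob || PySem.Str.isIn "bitcoin" blob))
    = (PySem.Str.isIn "btc" blob || PySem.Str.isIn "bitcoin" blob) := by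
  cases h1 : PySem.Str.isIn "btc" blob <;> cases h2 : PySem.Str.isIn "bitcoin" blob <;>
    simp only [btcHints, List.any_cons, List.any_nil, h1, h2, Bool.true_or, Bool.or_true,
      Bool.false_or, Bool.or_false, Bool.and_false, Bool.and_true]

lemma loop_eq_any (market : List (String × Option String)) (keys : List String) :
    matchesBtcLoop market keys = keys.any (fun key =>
      PySem.Str.isIn "btc" (PySem.Str.lower (((PySem.Dict.mk market).get? key).join.getD "")) ||
      PySem.Str.isIn "bitcoin" (PySem.Str.lower (((PySem.Dict.mk market).get? key).join.getD ""))) := by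
  induction keys with
  | nil => rfl
  | cons k rest ih =>
      simp only [matchesBtcLoop, List.any_cons, ih]
      split <;> simp_all

lemma or_regroup (b1 b2 b3 b4 b5 c1 c2 c3 c4 c5 : Bool) :
    ((b1 || b2 || b3 || b4 || b5) || (c1 || c2 || c3 || c4 || c5))
    = ((b1 || c1) || ((b2 || c2) || ((b3 || c3) || ((b4 || c4) || (b5 || c5))))) := by
  cases b1 <;> cases b2 <;> cases b3 <;> cases b4 <;> cases b5 <;>
    cases c1 <;> cases c2 <;> cases c3 <;> cases c4 <;> cases c5 <;> rfl

-- ===== VERDICT (by name: the statement is the Claim_ definition above) =====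
theorem matches_btc_py_spec : Claim_equal_matches_btc_py := by
  intro market _
  unfold Spec_matches_btc_py
  simp only [matches_btc_py, matches_btc_py_alt, List.map_cons, List.map_nil]
  rw [hints_drop, isIn_lower_blob _ _ _ _ _ _ (by decide), isIn_lower_blob _ _ _ _ _ _ (by decide),
    loop_eq_any]
  simp only [btcKeys, List.any_cons, List.any_nil, Bool.or_false]
  exact or_regroup _ _ _ _ _ _ _ _ _ _
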